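-- pv_equiv track=rewrite | github.com/miracle5284/Scientific-Calculator | Matrix.py | DiagonalMat
-- ===== SOURCE A (Python) =====
-- def DiagonalMat(X,n):
--     Id_Mat = []
--     Id_Mat.append(X)
--     Id_Mat.append(X)
--     row=1
--     while row < X+1:
--         col = 1
--         while col < X +1:
--             if col == row:
--                 Id_Mat.append(n)
--             else:
--                 Id_Mat.append(0)
--             col=col+1
--         row = row+1
--     return Id_Mat
-- ===== SOURCE B (Python) =====
-- def DiagonalMat(X, n):
--     m = X if X > 0 else 0
--     return [X, X] + [n if i % (X + 1) == 0 else 0 for i in range(m * m)]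
-- ===== Notes on version B (the rewrite author's own statement) =====
-- stated objective: simpler
-- what changed: Replaces the nested row/column while-loops with a single flat-index comprehension over range(m*m), using the closed form that diagonal entries of the row-major flattening sit at multiples of X+1.
import Mathlib
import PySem

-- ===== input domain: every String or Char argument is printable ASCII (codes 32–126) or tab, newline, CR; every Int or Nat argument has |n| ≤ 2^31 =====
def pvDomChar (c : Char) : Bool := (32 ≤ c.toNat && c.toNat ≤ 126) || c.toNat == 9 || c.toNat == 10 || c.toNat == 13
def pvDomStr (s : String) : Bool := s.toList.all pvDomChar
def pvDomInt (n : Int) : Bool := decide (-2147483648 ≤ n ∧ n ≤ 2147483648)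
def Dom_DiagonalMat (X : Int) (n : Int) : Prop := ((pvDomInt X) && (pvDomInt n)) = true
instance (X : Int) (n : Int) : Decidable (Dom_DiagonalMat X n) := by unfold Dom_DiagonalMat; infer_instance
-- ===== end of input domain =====

-- B replaces A's nested row/column while-loops by one flat-index comprehension
-- (diagonal entries sit at multiples of X+1 in the row-major flattening); same cost, simpler.

-- ===== PORT A =====
-- inner 'while col < X + 1' loop of A (fuel makes the loop total; it is exactly the
-- remaining iteration count, so the guard 'col < X + 1' still decides every step)
def pvColLoop (X n row col : Int) (acc : List Int) : Nat → List Int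
  | 0 => acc
  | Nat.succ f =>
    if col < X + 1 then
      pvColLoop X n row (col + 1) (acc ++ [if col = row then n else 0]) f
    else acc

-- outer 'while row < X + 1' loop of A
def pvRowLoop (X n row : Int) (acc : List Int) : Nat → List Int
  | 0 => acc
  | Nat.succ f =>
    if row < X + 1 then
      pvRowLoop X n (row + 1) (pvColLoop X n row 1 acc (X + 1 - 1).toNat) f
    else acc

def DiagonalMat (X : Int) (n : Int) : List Int :=
  pvRowLoop X n 1 [X, X] (X + 1 - 1).toNat

-- ===== PORT B =====
def DiagonalMat_alt (X : Int) (n : Int) : List Int :=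
  let m := if X > 0 then X else 0
  [X, X] ++ (PySem.List.pyRange 0 (m * m) 1).map
    (fun i => if PySem.Int.mod i (X + 1) = 0 then n else 0)

-- ===== PRECONDITION & SPEC =====
def Spec_DiagonalMat (X : Int) (n : Int) (out : List Int) : Prop := out = DiagonalMat_alt X n
instance (X : Int) (n : Int) (out : List Int) : Decidable (Spec_DiagonalMat X n out) := by unfold Spec_DiagonalMat; infer_instance

-- ===== CLAIM (what is proved, stated in full; the proofs are below) =====
def Claim_equal_DiagonalMat : Prop := ∀ (X : Int) (n : Int), Dom_DiagonalMat X n → Spec_DiagonalMat X n (DiagonalMat X n)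

-- ===== LEMMAS AND PROOFS =====

lemma pvColLoop_acc (k : Nat) : ∀ (X n row col : Int) (acc : List Int),
    pvColLoop X n row col acc k = acc ++ pvColLoop X n row col [] k := by
  induction k with
  | zero => intro X n row col acc; simp [pvColLoop]
  | succ k ih =>
    intro X n row col acc
    by_cases hlt : col < X + 1
    · rw [pvColLoop, pvColLoop, if_pos hlt, if_pos hlt]
      conv_rhs => rw [ih X n row (col + 1)]
      rw [ih X n row (col + 1)]
      simp
    · rw [pvColLoop, pvColLoop, if_neg hlt, if_neg hlt]
      simp

lemma pvColLoop_eq (k : Nat) : ∀ (X n row col : Int),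
    (X + 1 - col).toNat = k →
    pvColLoop X n row col [] k =
      (List.range k).map (fun (j : Nat) => if col + (j : Int) = row then n else 0) := by
  induction k with
  | zero => intro X n row col h; simp [pvColLoop]
  | succ k ih =>
    intro X n row col h
    have hlt : col < X + 1 := by omega
    rw [pvColLoop, if_pos hlt]
    rw [pvColLoop_acc k X n row (col + 1), ih X n row (col + 1) (by omega)]
    rw [List.range_succ_eq_map]
    simp only [List.map_map, List.nil_append, List.singleton_append, List.map_cons]
    congr 1
    · simp
    · apply List.map_congr_left
      intro j _
      simp only [Function.comp]
      have : col + 1 + (j : Int) = col + ((j : Int) + 1) := by ring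
      rw [this]
      push_cast
      ring_nf

lemma pvRowLoop_acc (k : Nat) : ∀ (X n row : Int) (acc : List Int),
    pvRowLoop X n row acc k = acc ++ pvRowLoop X n row [] k := by
  induction k with
  | zero => intro X n row acc; simp [pvRowLoop]
  | succ k ih =>
    intro X n row acc
    by_cases hlt : row < X + 1
    · rw [pvRowLoop, pvRowLoop, if_pos hlt, if_pos hlt]
      conv_rhs => rw [ih X n (row + 1)]
      rw [ih X n (row + 1)]
      rw [pvColLoop_acc (X + 1 - 1).toNat X n row 1 acc,
          pvColLoop_acc (X + 1 - 1).toNat X n row 1 []]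
      simp
    · rw [pvRowLoop, pvRowLoop, if_neg hlt, if_neg hlt]
      simp

lemma pvRowLoop_eq (k : Nat) : ∀ (X n row : Int),
    (X + 1 - row).toNat = k →
    pvRowLoop X n row [] k =
      (List.range k).flatMap
        (fun (i : Nat) => pvColLoop X n (row + (i : Int)) 1 [] (X + 1 - 1).toNat) := by
  induction k with
  | zero => intro X n row h; simp [pvRowLoop]
  | succ k ih =>
    intro X n row h
    have hlt : row < X + 1 := by omega
    rw [pvRowLoop, if_pos hlt]
    rw [pvRowLoop_acc k X n (row + 1), ih X n (row + 1) (by omega)]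
    rw [List.range_succ_eq_map]
    simp only [List.flatMap_cons, List.flatMap_map]
    congr 1
    · simp
    · apply List.flatMap_congr
      intro j _
      have : row + 1 + (j : Int) = row + ((j : Int) + 1) := by ring
      rw [this]
      push_cast
      ring_nf

lemma pvRangeMulFlat (b : Nat) (f : Nat → Int) : ∀ (a : Nat),
    (List.range (a * b)).map f =
      (List.range a).flatMap (fun i => (List.range b).map (fun j => f (i * b + j))) := by
  intro a
  induction a with
  | zero => simp
  | succ a ih =>
    have hm : (a + 1) * b = a * b + b := by ring
    rw [hm, List.range_add, List.map_append, ih, List.range_succ,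
        List.flatMap_append]
    congr 1
    simp [List.map_map, Function.comp]

lemma pvCell (X : Int) (m : Nat) (hm : (m : Int) = X) (i j : Nat)
    (hi : i < m) (hj : j < m) (n : Int) :
    (if PySem.Int.mod ((i * m + j : Nat) : Int) (X + 1) = 0 then n else 0) =
      (if (1 : Int) + (j : Int) = (1 : Int) + (i : Int) then n else 0) := by
  have hiX : (i : Int) ≤ X - 1 := by
    have : (i : Int) < (m : Int) := by exact_mod_cast hi
    omega
  have hjX : (j : Int) ≤ X - 1 := by
    have : (j : Int) < (m : Int) := by exact_mod_cast hj
    omega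
  have hi0 : (0 : Int) ≤ (i : Int) := Int.natCast_nonneg i
  have hj0 : (0 : Int) ≤ (j : Int) := Int.natCast_nonneg j
  have hx : 0 < X := by omega
  congr 1
  rw [PySem.Int.mod_eq_zero_iff_dvd]
  simp only [eq_iff_iff]
  constructor
  · intro hdvd
    have key : ((i * m + j : Nat) : Int) = (X + 1) * i + ((j : Int) - (i : Int)) := by
      push_cast [hm]; ring
    rw [key] at hdvd
    have hd2 : (X + 1) ∣ ((j : Int) - (i : Int)) :=
      (dvd_add_right (Dvd.intro _ rfl)).mp hdvd
    have hji : (j : Int) - (i : Int) = 0 :=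
      Int.eq_zero_of_abs_lt_dvd hd2 (by rw [abs_lt]; omega)
    omega
  · intro hij
    have : j = i := by omega
    subst this
    have : ((j * m + j : Nat) : Int) = (X + 1) * j := by push_cast [hm]; ring
    rw [this]
    exact Dvd.intro _ rfl

lemma diagonalMat_A_char (X n : Int) :
    DiagonalMat X n = [X, X] ++ (List.range X.toNat).flatMap
      (fun (i : Nat) => (List.range X.toNat).map
        (fun (j : Nat) => if (1 : Int) + (j : Int) = 1 + (i : Int) then n else 0)) := by
  have hfuel : (X + 1 - 1).toNat = X.toNat := by omega
  rw [DiagonalMat, pvRowLoop_acc (X + 1 - 1).toNat X n 1 [X, X],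
      pvRowLoop_eq (X + 1 - 1).toNat X n 1 rfl, hfuel]
  congr 1
  apply List.flatMap_congr
  intro i _
  rw [pvColLoop_eq X.toNat X n (1 + (i : Int)) 1 (by omega)]

-- ===== VERDICT (by name: the statement is the Claim_ definition above) =====
theorem DiagonalMat_spec : Claim_equal_DiagonalMat := by
  intro X n _
  unfold Spec_DiagonalMat DiagonalMat_alt
  rw [diagonalMat_A_char]
  by_cases hx : 0 < X
  · obtain ⟨m, hmx⟩ : ∃ m : Nat, X = (m : Int) := ⟨X.toNat, by omega⟩
    subst hmx
    have hmz : (if (m : Int) > 0 then (m : Int) else 0) = (m : Int) := if_pos hx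
    simp only [hmz, Int.toNat_natCast]
    congr 1
    rw [PySem.List.pyRange_one]
    have htn : ((m : Int) * (m : Int) - 0).toNat = m * m := by
      have h1 : ((m : Int) * (m : Int) - 0) = ((m * m : Nat) : Int) := by push_cast; ring
      rw [h1, Int.toNat_natCast]
    rw [htn, List.map_map, pvRangeMulFlat]
    apply List.flatMap_congr
    intro i hi
    apply List.map_congr_left
    intro j hj
    simp only [Function.comp, zero_add]
    rw [pvCell (m : Int) m rfl i j (List.mem_range.mp hi) (List.mem_range.mp hj) n]
  · have hmz : (if X > 0 then X else 0) = 0 := if_neg hx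
    have hXt : X.toNat = 0 := by omega
    simp [hmz, hXt]
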